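-- pv_equiv track=rewrite | github.com/jgolebiowski/coding-workspace | python-mxnet/ibdm/dataset/preprocess.py | get_3gram_lookap
-- ===== SOURCE A (Python) =====
-- def get_3gram_lookap(vocabulary):
--     """
--     Produce an 3-gram lookup dictionary from vocabulary.
--     Uses all letters in the vocabulary and special characters
--         start of word token: <
--         end of word token: >
--
--     Parameters
--     ----------
--     vocabulary : str
--         List of characters to be included
--
--     Returns
--     -------
--     dict[str: int]
--         The dictionary used for hashing, this must include all possible 3-grams
--         of letters in vocab and extra characters.
--     """
--     if len(vocabulary) != len(set(vocabulary)):
--         raise ValueError("Duplicate entry in the vocabulary")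
--     if "<" not in vocabulary:
--         vocabulary  = "<" + vocabulary
--     if ">" not in vocabulary:
--         vocabulary += ">"
--
--     index = 0
--     ngram_lookap = {}
--     for a in vocabulary:
--         for b in vocabulary:
--             for c in vocabulary:
--                 ngram_lookap[a + b + c] = index
--                 index += 1
--
--     return ngram_lookap
-- ===== SOURCE B (Python) =====
-- def get_3gram_lookap(vocabulary):
--     if len(vocabulary) != len(set(vocabulary)):
--         raise ValueError("Duplicate entry in the vocabulary")
--     if "<" not in vocabulary:
--         vocabulary = "<" + vocabulary
--     if ">" not in vocabulary:
--         vocabulary += ">"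
--
--     n = len(vocabulary)
--     ngram_lookap = {}
--     for t in range(n ** 3):
--         key = vocabulary[t // (n * n)] + vocabulary[(t // n) % n] + vocabulary[t % n]
--         ngram_lookap[key] = t
--     return ngram_lookap
-- ===== Notes on version B (the rewrite author's own statement) =====
-- stated objective: alternative
-- what changed: Replaces the triple nested loop with its running counter by a single flat loop over range(n**3) that decodes each index t into its trigram positionally (t//(n*n), (t//n)%n, t%n), so the counter variable disappears.
import Mathlib
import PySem

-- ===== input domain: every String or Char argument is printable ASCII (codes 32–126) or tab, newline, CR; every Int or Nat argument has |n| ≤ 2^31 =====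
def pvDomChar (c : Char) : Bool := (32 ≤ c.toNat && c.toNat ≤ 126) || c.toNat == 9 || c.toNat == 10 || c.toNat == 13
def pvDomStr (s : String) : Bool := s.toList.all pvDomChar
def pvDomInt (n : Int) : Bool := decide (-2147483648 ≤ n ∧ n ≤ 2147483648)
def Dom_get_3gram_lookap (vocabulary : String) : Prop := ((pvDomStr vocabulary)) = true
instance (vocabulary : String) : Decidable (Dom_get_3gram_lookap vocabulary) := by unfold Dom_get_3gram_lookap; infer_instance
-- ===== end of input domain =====

-- B replaces A's triple nested loop with its running counter by one flat loop over range(n**3)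
-- that decodes each index into its trigram positionally (alternative decomposition, same cost).

-- ===== PORT A =====
-- a + b + c of three 1-character strings is the 3-character string
def pvMk3 (a b c : Char) : String := String.ofList [a, b, c]

def get_3gram_lookap (vocabulary : String) : List (String × Int) :=
  -- on a duplicated vocabulary Python raises ValueError; Pre_ excludes exactly those inputs
  if PySem.Str.len vocabulary ≠ ((PySem.Set.ofList vocabulary.toList).length : Int) then []
  else
    let cs0 := vocabulary.toList
    let cs1 := if PySem.Chars.isIn ['<'] cs0 then cs0 else '<' :: cs0
    let cs := if PySem.Chars.isIn ['>'] cs1 then cs1 else cs1 ++ ['>']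
    (cs.foldl (fun (st : PySem.Dict String Int × Int) a =>
      cs.foldl (fun st b =>
        cs.foldl (fun st c =>
          (st.1.insert (pvMk3 a b c) st.2, st.2 + 1)) st) st)
      (PySem.Dict.empty, 0)).1.items

-- ===== PORT B =====
-- vocabulary[...] : every index B computes is in range, so the `.getD ' '` default is never used
def pvKeyB (cs : List Char) (n t : Int) : String :=
  String.ofList [(PySem.List.pyGet? cs (PySem.Int.floordiv t (n * n))).getD ' ',
             (PySem.List.pyGet? cs (PySem.Int.mod (PySem.Int.floordiv t n) n)).getD ' ',
             (PySem.List.pyGet? cs (PySem.Int.mod t n)).getD ' ']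

def get_3gram_lookap_alt (vocabulary : String) : List (String × Int) :=
  if PySem.Str.len vocabulary ≠ ((PySem.Set.ofList vocabulary.toList).length : Int) then []
  else
    let cs0 := vocabulary.toList
    let cs1 := if PySem.Chars.isIn ['<'] cs0 then cs0 else '<' :: cs0
    let cs := if PySem.Chars.isIn ['>'] cs1 then cs1 else cs1 ++ ['>']
    let n : Int := cs.length
    ((PySem.List.pyRange 0 (n ^ 3) 1).foldl
      (fun (d : PySem.Dict String Int) t => d.insert (pvKeyB cs n t) t)
      PySem.Dict.empty).items

-- ===== PRECONDITION & SPEC =====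
-- Pre_ excludes vocabularies with a repeated character, on which Python's A raises ValueError
def Pre_get_3gram_lookap (vocabulary : String) : Prop := vocabulary.toList.Nodup
instance (vocabulary : String) : Decidable (Pre_get_3gram_lookap vocabulary) := by
  unfold Pre_get_3gram_lookap; infer_instance
def pvWitness_get_3gram_lookap : String := "ab"

def Spec_get_3gram_lookap (vocabulary : String) (out : List (String × Int)) : Prop := out = get_3gram_lookap_alt vocabulary
instance (vocabulary : String) (out : List (String × Int)) : Decidable (Spec_get_3gram_lookap vocabulary out) := by unfold Spec_get_3gram_lookap; infer_instance

-- ===== CLAIM (what is proved, stated in full; the proofs are below) =====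
def Claim_equal_get_3gram_lookap : Prop := ∀ (vocabulary : String), Dom_get_3gram_lookap vocabulary → Pre_get_3gram_lookap vocabulary → Spec_get_3gram_lookap vocabulary (get_3gram_lookap vocabulary)

-- ===== LEMMAS AND PROOFS =====

-- the sequence of (key, value) pairs A's counter loop inserts, keys tagged with indices from i
def pvTag (i : Int) : List String → List (String × Int)
  | [] => []
  | k :: ks => (k, i) :: pvTag (i + 1) ks

theorem pvTag_getElem? (ks : List String) (i : Int) (j : Nat) :
    (pvTag i ks)[j]? = ks[j]?.map (fun k => (k, i + j)) := by
  induction ks generalizing i j with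
  | nil => simp [pvTag]
  | cons k ks ih =>
    cases j with
    | zero => simp [pvTag]
    | succ j =>
      have h : i + 1 + (j : Int) = i + ((j : Int) + 1) := by ring
      simp [pvTag, ih, h]

-- a fold inserting successive keys with a running counter is a fold over the tagged pair list
theorem pv_foldl_counter (ks : List String) (d : PySem.Dict String Int) (i : Int) :
    ks.foldl (fun st k => (st.1.insert k st.2, st.2 + 1)) (d, i)
      = ((pvTag i ks).foldl (fun d (p : String × Int) => d.insert p.1 p.2) d,
         i + ks.length) := by
  induction ks generalizing d i with
  | nil => simp [pvTag]
  | cons k ks ih => simp [pvTag, ih]; ring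

-- indexing a flatMap whose pieces all have length m
theorem pv_flatMap_getElem? {α β : Type} (f : α → List β) (m : Nat) (hm : 0 < m)
    (hf : ∀ a, (f a).length = m) :
    ∀ (l : List α) (j : Nat), (l.flatMap f)[j]? = l[j / m]?.bind (fun a => (f a)[j % m]?) := by
  intro l
  induction l with
  | nil => intro j; simp
  | cons a l ih =>
    intro j
    by_cases hj : j < m
    · have h0 : j / m = 0 := Nat.div_eq_of_lt hj
      have h1 : j % m = j := Nat.mod_eq_of_lt hj
      simp [List.flatMap_cons, List.getElem?_append, hf a ▸ hj, h0, h1]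
    · have hj' : m ≤ j := Nat.le_of_not_lt hj
      have h0 : j / m = (j - m) / m + 1 := by
        conv_lhs => rw [← Nat.sub_add_cancel hj']
        rw [Nat.add_div_right _ hm]
      have h1 : j % m = (j - m) % m := by
        conv_lhs => rw [← Nat.sub_add_cancel hj', Nat.add_mod_right]
      rw [List.flatMap_cons, List.getElem?_append_right (by rw [hf a]; exact hj'),
        hf a, h0, h1]
      simp [ih]

theorem pv_inner_len (cs : List Char) (a : Char) :
    (cs.flatMap (fun b => cs.map (pvMk3 a b))).length = cs.length * cs.length := by
  simp [List.length_flatMap, List.map_const']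

-- the core equality, on the adjusted character list
theorem pv_main (cs : List Char) (hcs : cs ≠ []) :
    ((cs.foldl (fun (st : PySem.Dict String Int × Int) a =>
      cs.foldl (fun st b =>
        cs.foldl (fun st c =>
          (st.1.insert (pvMk3 a b c) st.2, st.2 + 1)) st) st)
      (PySem.Dict.empty, 0)).1).items
    = (((PySem.List.pyRange 0 ((cs.length : Int) ^ 3) 1).foldl
        (fun (d : PySem.Dict String Int) t => d.insert (pvKeyB cs (cs.length : Int) t) t)
        PySem.Dict.empty)).items := by
  have hn : 0 < cs.length := List.length_pos_iff.mpr hcs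
  have hA : (cs.foldl (fun (st : PySem.Dict String Int × Int) a =>
      cs.foldl (fun st b =>
        cs.foldl (fun st c =>
          (st.1.insert (pvMk3 a b c) st.2, st.2 + 1)) st) st)
      (PySem.Dict.empty, 0))
      = ((cs.flatMap (fun a => cs.flatMap (fun b => cs.map (fun c => pvMk3 a b c)))).foldl
          (fun st k => (st.1.insert k st.2, st.2 + 1)) (PySem.Dict.empty, (0 : Int))) := by
    simp [List.foldl_flatMap, List.foldl_map]
  rw [hA, pv_foldl_counter]
  have hN : ((cs.length : Int) ^ 3 - 0).toNat = cs.length ^ 3 := by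
    rw [sub_zero, ← Nat.cast_pow, Int.toNat_natCast]
  rw [PySem.List.pyRange_one, hN]
  have h : pvTag 0 (cs.flatMap (fun a => cs.flatMap (fun b => cs.map (fun c => pvMk3 a b c))))
      = (List.range (cs.length ^ 3)).map
          (fun k => (pvKeyB cs (cs.length : Int) ((k : Nat) : Int), ((k : Nat) : Int))) := by
    have hlen : (cs.flatMap (fun a => cs.flatMap (fun b => cs.map (fun c => pvMk3 a b c)))).length
        = cs.length ^ 3 := by
      simp [List.length_flatMap, List.map_const']
      ring
    apply List.ext_getElem?
    intro j
    rw [pvTag_getElem?]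
    by_cases hj : j < cs.length ^ 3
    · have hLL : 0 < cs.length * cs.length := Nat.mul_pos hn hn
      have hj' : j < cs.length * (cs.length * cs.length) := by
        calc j < cs.length ^ 3 := hj
        _ = cs.length * (cs.length * cs.length) := by ring
      have h1 : j / (cs.length * cs.length) < cs.length :=
        Nat.div_lt_of_lt_mul (by linarith [hj'])
      have hr : j % (cs.length * cs.length) < cs.length * cs.length := Nat.mod_lt _ hLL
      have h2 : j % (cs.length * cs.length) / cs.length < cs.length :=
        Nat.div_lt_of_lt_mul hr
      have h3 : j % (cs.length * cs.length) % cs.length < cs.length := Nat.mod_lt _ hn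
      rw [pv_flatMap_getElem? _ (cs.length * cs.length) hLL (pv_inner_len cs)]
      rw [List.getElem?_eq_getElem h1, Option.bind_some]
      rw [pv_flatMap_getElem? _ cs.length hn (fun b => by simp)]
      rw [List.getElem?_eq_getElem h2, Option.bind_some]
      rw [List.getElem?_map, List.getElem?_eq_getElem h3]
      rw [List.getElem?_map, List.getElem?_range hj]
      have e2 : j % (cs.length * cs.length) / cs.length = j / cs.length % cs.length :=
        Nat.mod_mul_right_div_self j cs.length cs.length
      have e3 : j % (cs.length * cs.length) % cs.length = j % cs.length :=
        Nat.mod_mod_of_dvd j (dvd_mul_left cs.length cs.length)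
      simp only [Option.map_some, Option.some.injEq, Prod.mk.injEq]
      constructor
      · simp only [e2, e3]
        simp only [pvKeyB, pvMk3]
        rw [show ((cs.length : Int) * (cs.length : Int))
              = (((cs.length * cs.length : Nat)) : Int) by push_cast; ring]
        simp only [PySem.Int.floordiv_natCast, PySem.Int.mod_natCast,
          PySem.List.pyGet?_natCast]
        rw [List.getElem?_eq_getElem h1,
          List.getElem?_eq_getElem (Nat.mod_lt (j / cs.length) hn),
          List.getElem?_eq_getElem (Nat.mod_lt j hn)]
        simp only [Option.getD_some]
      · omega
    · have hnone : (cs.flatMap (fun a => cs.flatMap (fun b => cs.map (fun c => pvMk3 a b c))))[j]? = none := by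
        rw [List.getElem?_eq_none_iff, hlen]
        omega
      have hnone2 : ((List.range (cs.length ^ 3)).map
          (fun k => (pvKeyB cs (cs.length : Int) ((k : Nat) : Int), ((k : Nat) : Int))))[j]? = none := by
        rw [List.getElem?_eq_none_iff]
        simp
        omega
      rw [hnone, hnone2, Option.map_none]
  rw [h, List.foldl_map, List.foldl_map]
  simp

-- ===== VERDICT (by name: the statement is the Claim_ definition above) =====
theorem get_3gram_lookap_spec : Claim_equal_get_3gram_lookap := by
  intro v _ hpre
  unfold Spec_get_3gram_lookap get_3gram_lookap get_3gram_lookap_alt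
  have hguard : ¬ (PySem.Str.len v ≠ ((PySem.Set.ofList v.toList).length : Int)) := by
    simp [PySem.Str.len_eq, PySem.Set.ofList_eq_self_of_nodup v.toList hpre]
  rw [if_neg hguard, if_neg hguard]
  have hcs : ∀ cs1 : List Char,
      (if PySem.Chars.isIn ['>'] cs1 then cs1 else cs1 ++ ['>']) ≠ [] := by
    intro cs1
    split
    · rename_i h
      have := (PySem.Chars.isIn_iff_infix _ _).mp h
      intro hnil; subst hnil; simp at this
    · simp
  dsimp only
  exact pv_main _ (hcs _)
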